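-- pv_equiv track=rewrite | github.com/matrixproduct/GoogleFoobar | Level_5/level_5_disorderly_escape.py | simplify_poly
-- ===== SOURCE A (Python) =====
-- from copy import copy
--
-- def simplify_poly(P):
--     ''' Simplifies polynomial by summing up similar monomials'''
--     S = []
--     for elem in P:
--         new = True
--         for term in S:
--             if elem[0] == term[0]:
--                 term[1] += elem[1]
--                 new = False
--                 break
--         if new:
--             S.append(copy(elem))
--     return S
-- ===== SOURCE B (Python) =====
-- from copy import copy
--
-- def simplify_poly(P):
--     ''' Simplifies polynomial by summing up similar monomials'''
--     out = []
--     rest = P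
--     while rest:
--         e, rest = rest[0], rest[1:]
--         same = [f[1] for f in rest if f[0] == e[0]]
--         t = copy(e)
--         if same:
--             t[1] += sum(same)
--         rest = [f for f in rest if f[0] != e[0]]
--         out.append(t)
--     return out
-- ===== Notes on version B (the rewrite author's own statement) =====
-- stated objective: alternative
-- what changed: B repeatedly partitions the remaining input by the current head's key, emitting each merged monomial once with the sum of all its later coefficients, instead of A's per-element linear scan of the growing result list.
import Mathlib
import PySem

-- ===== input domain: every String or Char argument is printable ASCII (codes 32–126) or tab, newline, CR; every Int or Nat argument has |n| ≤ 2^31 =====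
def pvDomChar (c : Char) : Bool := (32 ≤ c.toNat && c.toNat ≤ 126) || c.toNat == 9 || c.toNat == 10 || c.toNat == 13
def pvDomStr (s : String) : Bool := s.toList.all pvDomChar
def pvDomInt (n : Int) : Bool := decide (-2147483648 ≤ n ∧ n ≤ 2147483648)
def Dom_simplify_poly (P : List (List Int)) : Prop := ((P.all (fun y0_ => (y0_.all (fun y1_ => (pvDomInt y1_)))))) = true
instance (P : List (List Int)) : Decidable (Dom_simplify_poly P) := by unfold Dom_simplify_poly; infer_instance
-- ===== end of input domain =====

-- B merges each key's coefficients by partitioning the remaining input per key (same cost class as A);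
-- equivalence is about return values (neither program observably mutates P: A mutates only copies).

-- Python l[i] for the literal indices 0/1; exact under Pre_ (index always in range there).
def pyAt (l : List Int) (i : Nat) : Int := l.getD i 0

-- ===== PORT A =====
-- term[1] += elem[1]  (list-slot assignment; exact under Pre_)
def bumpA (t elem : List Int) : List Int := t.set 1 (pyAt t 1 + pyAt elem 1)

-- the inner 'for term in S: if elem[0]==term[0]: …; break' loop; none = no match (new stays True)
def updateA (elem : List Int) : List (List Int) → Option (List (List Int))
  | [] => none
  | t :: ts =>
    if pyAt elem 0 = pyAt t 0 then some (bumpA t elem :: ts)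
    else match updateA elem ts with
         | some r => some (t :: r)
         | none => none

def stepA (S : List (List Int)) (elem : List Int) : List (List Int) :=
  match updateA elem S with
  | some S' => S'
  | none => S ++ [elem]    -- S.append(copy(elem)); copy of a list of ints = the same value

def simplify_poly (P : List (List Int)) : List (List Int) :=
  P.foldl stepA []

-- ===== PORT B =====
-- the while loop of Source B: pop the head, sum the matching later coefficients, drop them, recurse on the rest
def simplify_poly_alt_go : List (List Int) → List (List Int)
  | [] => []
  | e :: rest =>
    let same := (rest.filter (fun f => decide (pyAt f 0 = pyAt e 0))).map (fun f => pyAt f 1)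
    let t := if same.isEmpty then e else e.set 1 (pyAt e 1 + same.sum)
    t :: simplify_poly_alt_go (rest.filter (fun f => decide (pyAt f 0 ≠ pyAt e 0)))
  termination_by l => l.length
  decreasing_by
    simp only [List.length_unattach]
    exact Nat.lt_succ_of_le (Nat.le_trans (List.length_filter_le _ rest.attach) (by simp))

def simplify_poly_alt (P : List (List Int)) : List (List Int) :=
  simplify_poly_alt_go P

-- ===== PRECONDITION & SPEC =====
-- Pre_ is exactly the set of inputs the Python A returns on: A raises IndexError as soon as it indexes
-- a monomial list that is too short — any empty monomial in a list of length ≥ 2, or any monomial of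
-- length < 2 whose key occurs at least twice (the merge reads slot 1 of both lists).
def Pre_simplify_poly (P : List (List Int)) : Prop :=
  P.length ≤ 1 ∨
    ∀ e ∈ P, 1 ≤ e.length ∧
      (2 ≤ P.countP (fun f => decide (pyAt f 0 = pyAt e 0)) → 2 ≤ e.length)
instance (P : List (List Int)) : Decidable (Pre_simplify_poly P) := by
  unfold Pre_simplify_poly; infer_instance

def pvWitness_simplify_poly : List (List Int) := [[1, 2], [1, 3], [2, 5], [1, -1]]

def Spec_simplify_poly (P : List (List Int)) (out : List (List Int)) : Prop := out = simplify_poly_alt P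
instance (P : List (List Int)) (out : List (List Int)) : Decidable (Spec_simplify_poly P out) := by unfold Spec_simplify_poly; infer_instance

-- ===== CLAIM (what is proved, stated in full; the proofs are below) =====
def Claim_equal_simplify_poly : Prop := ∀ (P : List (List Int)), Dom_simplify_poly P → Pre_simplify_poly P → Spec_simplify_poly P (simplify_poly P)

-- ===== LEMMAS AND PROOFS =====

theorem pyAt_set_one_zero (t : List Int) (v : Int) : pyAt (t.set 1 v) 0 = pyAt t 0 := by
  cases t with
  | nil => rfl
  | cons a ts => cases ts <;> rfl

theorem pyAt_bumpA_zero (t e : List Int) : pyAt (bumpA t e) 0 = pyAt t 0 := by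
  simp [bumpA, pyAt_set_one_zero]

theorem stepA_cons (t : List Int) (S : List (List Int)) (f : List Int) :
    stepA (t :: S) f =
      if pyAt f 0 = pyAt t 0 then bumpA t f :: S else t :: stepA S f := by
  by_cases h : pyAt f 0 = pyAt t 0
  · simp [stepA, updateA, h]
  · simp only [stepA, updateA, if_neg h]
    cases hu : updateA f S <;> simp

theorem set_one_of_short (t : List Int) (v : Int) (h : t.length ≤ 1) : t.set 1 v = t := by
  match t, h with
  | [], _ => rfl
  | [a], _ => rfl

-- collapsing A's chain of in-place merges into one sum
theorem foldl_bumpA (ms : List (List Int)) (t : List Int) :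
    ms.foldl bumpA t =
      if ms.isEmpty then t else t.set 1 (pyAt t 1 + (ms.map (fun f => pyAt f 1)).sum) := by
  induction ms generalizing t with
  | nil => rfl
  | cons m ms ih =>
    simp only [List.foldl_cons, ih, List.isEmpty_cons, Bool.false_eq_true, if_false]
    by_cases hlen : 2 ≤ t.length
    · have h1 : 1 < t.length := by omega
      have hget : pyAt ((t.set 1 (pyAt t 1 + pyAt m 1))) 1 = pyAt t 1 + pyAt m 1 := by
        simp [pyAt, h1]
      cases hms : ms.isEmpty
      · simp only [Bool.false_eq_true, if_false, bumpA, hget, List.set_set, List.map_cons,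
          List.sum_cons]
        ring_nf
      · have : ms = [] := List.isEmpty_iff.mp hms
        subst this
        simp [bumpA]
    · have hsh : t.length ≤ 1 := by omega
      have hb : bumpA t m = t := set_one_of_short _ _ hsh
      rw [hb, set_one_of_short _ _ hsh, set_one_of_short _ _ hsh]
      split <;> rfl

-- the head of A's state absorbs exactly the later matching elements; the tail evolves independently
theorem foldl_stepA_decompose (rest : List (List Int)) :
    ∀ (t : List Int) (S : List (List Int)),
    List.foldl stepA (t :: S) rest =
      ((rest.filter (fun f => decide (pyAt f 0 = pyAt t 0))).foldl bumpA t)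
        :: List.foldl stepA S (rest.filter (fun f => decide (pyAt f 0 ≠ pyAt t 0))) := by
  induction rest with
  | nil => intro t S; rfl
  | cons f rest ih =>
    intro t S
    by_cases h : pyAt f 0 = pyAt t 0
    · simp only [List.foldl_cons, stepA_cons, if_pos h, List.filter_cons,
        decide_eq_true h, if_pos, ih, pyAt_bumpA_zero]
      simp [h, List.foldl_cons]
    · simp only [List.foldl_cons, stepA_cons, if_neg h, List.filter_cons]
      rw [ih]
      simp [h]

theorem main_aux : ∀ (n : Nat) (P : List (List Int)), P.length ≤ n →
    List.foldl stepA [] P = simplify_poly_alt_go P := by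
  intro n
  induction n with
  | zero =>
    intro P hP
    have : P = [] := List.eq_nil_of_length_eq_zero (Nat.le_zero.mp hP)
    subst this; unfold simplify_poly_alt_go; rfl
  | succ n ih =>
    intro P hP
    cases P with
    | nil => unfold simplify_poly_alt_go; rfl
    | cons e rest =>
      have h1 : stepA [] e = [e] := rfl
      rw [List.foldl_cons, h1, foldl_stepA_decompose, foldl_bumpA]
      have hrec := ih (rest.filter (fun f => decide (pyAt f 0 ≠ pyAt e 0)))
        (Nat.le_trans (List.length_filter_le _ _) (Nat.le_of_succ_le_succ hP))
      rw [hrec]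
      conv_rhs => unfold simplify_poly_alt_go
      simp only [List.isEmpty_map]

-- ===== VERDICT (by name: the statement is the Claim_ definition above) =====
theorem simplify_poly_spec : Claim_equal_simplify_poly := by
  intro P _ _
  show simplify_poly P = simplify_poly_alt P
  exact main_aux P.length P (Nat.le_refl _)
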